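-- pv_equiv track=rewrite | github.com/IMIO/ideabox.policy | src/ideabox/policy/content/project.py | generate_draft_time_line
-- ===== SOURCE A (Python) =====
-- def generate_draft_time_line(state, history):
--     draft_date = ''
--     deposited_date = ''
--     project_analysis_date = ''
--     vote_date = ''
--     result_analysis_date = ''
--     for status in history:
--         if status.get('review_state') == 'result_analysis' \
--            and result_analysis_date == '' \
--            and state == 'result_analysis':
--             result_analysis_date = status.get('time')
--         if status.get('review_state') == 'vote' \
--            and vote_date == '' \
--            and state in ['result_analysis', 'vote']:
--             vote_date = status.get('time')
--         if status.get('review_state') == 'project_analysis' \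
--            and project_analysis_date == '' \
--            and state in ['result_analysis', 'vote', 'project_analysis']:
--             project_analysis_date = status.get('time')
--         if status.get('review_state') == 'deposited' \
--            and deposited_date == '' \
--            and state in ['result_analysis', 'vote', 'project_analysis', 'deposited']:
--             deposited_date = status.get('time')
--         if status.get('review_state') == 'draft' and draft_date == '':
--             draft_date = status.get('time')
--     return [draft_date, deposited_date, project_analysis_date, vote_date, result_analysis_date]
-- ===== SOURCE B (Python) =====
-- STATES = ['draft', 'deposited', 'project_analysis', 'vote', 'result_analysis']
--
--
-- def _first_time(history, name):
--     # first recorded time for this state that is not the '' sentinel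
--     for status in history:
--         if status.get('review_state') == name:
--             t = status.get('time')
--             if t != '':
--                 return t
--     return ''
--
--
-- def generate_draft_time_line(state, history):
--     rank = STATES.index(state) if state in STATES else 0
--     return [_first_time(history, STATES[i]) if i <= rank else ''
--             for i in range(5)]
-- ===== Notes on version B (the rewrite author's own statement) =====
-- stated objective: simpler
-- what changed: Replaces A's single fold over five independently-gated accumulator variables with a reusable helper that scans history for the first non-empty recorded time of a given state, plus a rank-based cumulative gating computed once from the state's index in the ordered state list.
import Mathlib
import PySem

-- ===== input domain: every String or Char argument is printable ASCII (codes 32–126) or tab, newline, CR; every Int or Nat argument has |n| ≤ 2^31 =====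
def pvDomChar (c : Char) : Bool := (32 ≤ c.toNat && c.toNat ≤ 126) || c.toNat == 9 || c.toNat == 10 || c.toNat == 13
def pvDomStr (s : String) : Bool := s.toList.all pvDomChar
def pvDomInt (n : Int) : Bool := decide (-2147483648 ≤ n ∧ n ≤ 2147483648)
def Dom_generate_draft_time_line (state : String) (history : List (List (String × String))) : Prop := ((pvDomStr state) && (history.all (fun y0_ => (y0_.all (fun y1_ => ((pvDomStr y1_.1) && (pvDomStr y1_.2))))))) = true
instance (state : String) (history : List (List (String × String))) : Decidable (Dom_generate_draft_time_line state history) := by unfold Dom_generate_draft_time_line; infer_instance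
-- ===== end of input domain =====

-- B collects, per state, the first non-'' recorded time in one reusable scan and
-- applies the cumulative gating separately via the state's rank; objective: simpler.

-- ===== PORT A =====
-- one iteration of A's loop body over the five accumulators (order of the ifs as in A)
def pvStepA (state : String)
    (acc : Option String × Option String × Option String × Option String × Option String)
    (status : List (String × String)) :
    Option String × Option String × Option String × Option String × Option String :=
  let rs := (PySem.Dict.mk status).get? "review_state"
  let tm := (PySem.Dict.mk status).get? "time"
  let (draft, dep, pa, vote, ra) := acc
  let ra' := if rs == some "result_analysis" && ra == some "" && state == "result_analysis" then tm else ra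
  let vote' := if rs == some "vote" && vote == some "" && (["result_analysis", "vote"].contains state) then tm else vote
  let pa' := if rs == some "project_analysis" && pa == some "" && (["result_analysis", "vote", "project_analysis"].contains state) then tm else pa
  let dep' := if rs == some "deposited" && dep == some "" && (["result_analysis", "vote", "project_analysis", "deposited"].contains state) then tm else dep
  let draft' := if rs == some "draft" && draft == some "" then tm else draft
  (draft', dep', pa', vote', ra')

def generate_draft_time_line (state : String) (history : List (List (String × String))) : List (Option String) :=
  let r := history.foldl (pvStepA state) (some "", some "", some "", some "", some "")
  [r.1, r.2.1, r.2.2.1, r.2.2.2.1, r.2.2.2.2]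

-- ===== PORT B =====
def pvStates : List String := ["draft", "deposited", "project_analysis", "vote", "result_analysis"]

-- first recorded time for this state that is not the '' sentinel
def pvFirstTime (history : List (List (String × String))) (name : String) : Option String :=
  match history with
  | [] => some ""
  | status :: rest =>
    if (PySem.Dict.mk status).get? "review_state" == some name then
      let t := (PySem.Dict.mk status).get? "time"
      if t ≠ some "" then t else pvFirstTime rest name
    else pvFirstTime rest name

def generate_draft_time_line_alt (state : String) (history : List (List (String × String))) : List (Option String) :=
  let rank : Nat := if pvStates.contains state then (PySem.List.index? pvStates state).getD 0 else 0
  (List.range 5).map (fun i => if i ≤ rank then pvFirstTime history (pvStates.getD i "") else some "")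

-- ===== PRECONDITION & SPEC =====
def Spec_generate_draft_time_line (state : String) (history : List (List (String × String))) (out : List (Option String)) : Prop := out = generate_draft_time_line_alt state history
instance (state : String) (history : List (List (String × String))) (out : List (Option String)) : Decidable (Spec_generate_draft_time_line state history out) := by unfold Spec_generate_draft_time_line; infer_instance

-- ===== CLAIM (what is proved, stated in full; the proofs are below) =====
def Claim_equal_generate_draft_time_line : Prop := ∀ (state : String) (history : List (List (String × String))), Dom_generate_draft_time_line state history → Spec_generate_draft_time_line state history (generate_draft_time_line state history)

-- ===== LEMMAS AND PROOFS =====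

-- final value of one accumulator component, as a function of its start value and gate
def pvComp (h : List (List (String × String))) (x : Option String) (gate : Bool) (name : String) : Option String :=
  if gate && x == some "" then pvFirstTime h name else x

theorem pvFoldA_eq (state : String) : ∀ (h : List (List (String × String)))
    (a b c d e : Option String),
    h.foldl (pvStepA state) (a, b, c, d, e) =
      (pvComp h a true "draft",
       pvComp h b (["result_analysis", "vote", "project_analysis", "deposited"].contains state) "deposited",
       pvComp h c (["result_analysis", "vote", "project_analysis"].contains state) "project_analysis",
       pvComp h d (["result_analysis", "vote"].contains state) "vote",
       pvComp h e (state == "result_analysis") "result_analysis") := by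
  intro h
  induction h with
  | nil => intro a b c d e; simp [pvComp, pvFirstTime]
  | cons s t ih =>
    intro a b c d e
    simp only [List.foldl_cons, pvStepA, ih]
    have key : ∀ (x : Option String) (gate : Bool) (name : String),
        pvComp t (if (PySem.Dict.mk s).get? "review_state" == some name && x == some "" && gate
                  then (PySem.Dict.mk s).get? "time" else x) gate name
        = pvComp (s :: t) x gate name := by
      intro x gate name
      simp only [pvComp, pvFirstTime]
      by_cases hg : gate
      · by_cases hx : x = some ""
        · by_cases hrs : (PySem.Dict.mk s).get? "review_state" == some name
          · by_cases ht : (PySem.Dict.mk s).get? "time" = some ""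
            · simp [hg, hx, hrs, ht]
            · simp [hg, hx, hrs, ht]
          · simp [hg, hx, hrs]
        · simp [hg, hx]
      · simp [hg]
    refine congrArg₂ _ ?_ (congrArg₂ _ ?_ (congrArg₂ _ ?_ (congrArg₂ _ ?_ ?_)))
    · rw [← key a true "draft"]; simp
    · rw [← key b _ "deposited"]
    · rw [← key c _ "project_analysis"]
    · rw [← key d _ "vote"]
    · rw [← key e _ "result_analysis"]

-- ===== VERDICT (by name: the statement is the Claim_ definition above) =====
theorem generate_draft_time_line_spec : Claim_equal_generate_draft_time_line := by
  intro state history _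
  unfold Spec_generate_draft_time_line generate_draft_time_line generate_draft_time_line_alt
  simp only [pvFoldA_eq]
  by_cases h1 : state = "draft"
  · subst h1
    have hx : List.idxOf? "draft" ["draft", "deposited", "project_analysis", "vote", "result_analysis"] = some 0 := by decide
    simp [pvComp, pvStates, PySem.List.index?, hx, List.range, List.range.loop]
  by_cases h2 : state = "deposited"
  · subst h2
    have hx : List.idxOf? "deposited" ["draft", "deposited", "project_analysis", "vote", "result_analysis"] = some 1 := by decide
    simp [pvComp, pvStates, PySem.List.index?, hx, List.range, List.range.loop]
  by_cases h3 : state = "project_analysis"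
  · subst h3
    have hx : List.idxOf? "project_analysis" ["draft", "deposited", "project_analysis", "vote", "result_analysis"] = some 2 := by decide
    simp [pvComp, pvStates, PySem.List.index?, hx, List.range, List.range.loop]
  by_cases h4 : state = "vote"
  · subst h4
    have hx : List.idxOf? "vote" ["draft", "deposited", "project_analysis", "vote", "result_analysis"] = some 3 := by decide
    simp [pvComp, pvStates, PySem.List.index?, hx, List.range, List.range.loop]
  by_cases h5 : state = "result_analysis"
  · subst h5
    have hx : List.idxOf? "result_analysis" ["draft", "deposited", "project_analysis", "vote", "result_analysis"] = some 4 := by decide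
    simp [pvComp, pvStates, PySem.List.index?, hx, List.range, List.range.loop]
  · simp [pvComp, pvStates, h1, h2, h3, h4, h5, List.range, List.range.loop]
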